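-- pv_equiv track=rewrite | github.com/Bruh-Fly/blueoc-test | TASK1/task1.py | most_frequent_length_strings
-- ===== SOURCE A (Python) =====
-- def most_frequent_length_strings(arr):
--
--     # Bước 1: tạo dictionary đếm độ dài
--     length_count = {}
--
--     # Bước 2: duyệt mảng
--     for s in arr:
--         length = len(s)
--
--         if length in length_count:
--             length_count[length] += 1
--         else:
--             length_count[length] = 1
--
--     # Bước 3: tìm tần suất lớn nhất
--     max_frequency = max(length_count.values())
--
--     # Bước 4: tìm độ dài có tần suất lớn nhất
--     most_common_length = None
--     for length, count in length_count.items():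
--         if count == max_frequency:
--             most_common_length = length
--             break
--
--     # Bước 5: lọc chuỗi
--     result = [s for s in arr if len(s) == most_common_length]
--
--     return result
-- ===== SOURCE B (Python) =====
-- def most_frequent_length_strings(arr):
--     # group strings by length in one pass; return the first largest bucket
--     groups = {}
--     for s in arr:
--         groups.setdefault(len(s), []).append(s)
--     max_size = max(len(bucket) for bucket in groups.values())
--     for bucket in groups.values():
--         if len(bucket) == max_size:
--             return bucket
-- ===== Notes on version B (the rewrite author's own statement) =====
-- stated objective: simpler
-- what changed: B builds a dict of per-length buckets in one pass and returns the first largest bucket directly, replacing A's count dict, key-search loop and separate filter pass over arr.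
import Mathlib
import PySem

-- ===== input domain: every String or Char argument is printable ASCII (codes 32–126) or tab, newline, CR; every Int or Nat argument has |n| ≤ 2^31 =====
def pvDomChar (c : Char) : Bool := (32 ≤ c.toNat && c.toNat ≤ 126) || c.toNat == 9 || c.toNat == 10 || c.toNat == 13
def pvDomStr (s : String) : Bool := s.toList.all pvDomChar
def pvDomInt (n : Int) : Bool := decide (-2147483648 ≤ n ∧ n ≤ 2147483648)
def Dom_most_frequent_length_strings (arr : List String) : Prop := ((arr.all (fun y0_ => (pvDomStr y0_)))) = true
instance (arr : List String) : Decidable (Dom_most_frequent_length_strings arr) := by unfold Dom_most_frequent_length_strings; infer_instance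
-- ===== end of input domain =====

-- B groups the strings into per-length buckets in one pass and returns the first largest
-- bucket directly, replacing A's count dict + key search + separate filter pass (objective: simpler).

-- ===== PORT A =====
-- step 4's loop: first (length, count) item whose count equals max_frequency (= break);
-- max_frequency is an Option because Python's max raises on an empty dict (excluded by Pre_)
def mfls_find_length (items : List (Int × Int)) (mf : Option Int) : Option Int :=
  match items with
  | [] => none
  | (l, c) :: rest => if some c == mf then some l else mfls_find_length rest mf

def most_frequent_length_strings (arr : List String) : List String :=
  let length_count : PySem.Dict Int Int := arr.foldl (fun d s =>
    let length := PySem.Str.len s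
    if d.contains length then d.insert length (d.getD length 0 + 1)
    else d.insert length 1) PySem.Dict.empty
  let max_frequency := PySem.List.max? length_count.values (fun x => x)
  let most_common_length := mfls_find_length length_count.items max_frequency
  arr.filter (fun s => most_common_length == some (PySem.Str.len s))

-- ===== PORT B =====
-- B's final loop: first bucket whose size equals max_size; [] stands for the fall-through
-- (Python's implicit None), unreachable on Pre_ since max_size is one of the sizes
def mfls_find_bucket (buckets : List (List String)) (ms : Option Int) : List String :=
  match buckets with
  | [] => []
  | b :: rest => if some (b.length : Int) == ms then b else mfls_find_bucket rest ms

def most_frequent_length_strings_alt (arr : List String) : List String :=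
  let groups : PySem.Dict Int (List String) := arr.foldl (fun d s =>
    d.modify (PySem.Str.len s) [] (fun b => b ++ [s])) PySem.Dict.empty
  let max_size := PySem.List.max? (groups.values.map (fun b => (b.length : Int))) (fun x => x)
  mfls_find_bucket groups.values max_size

-- ===== PRECONDITION & SPEC =====
-- Pre_ excludes only the empty list, on which Python's max() raises ValueError in both A and B.
def Pre_most_frequent_length_strings (arr : List String) : Prop := arr ≠ []
instance (arr : List String) : Decidable (Pre_most_frequent_length_strings arr) := by unfold Pre_most_frequent_length_strings; infer_instance
def pvWitness_most_frequent_length_strings : List String := ["ab"]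

def Spec_most_frequent_length_strings (arr : List String) (out : List String) : Prop := out = most_frequent_length_strings_alt arr
instance (arr : List String) (out : List String) : Decidable (Spec_most_frequent_length_strings arr out) := by unfold Spec_most_frequent_length_strings; infer_instance

-- ===== CLAIM (what is proved, stated in full; the proofs are below) =====
def Claim_equal_most_frequent_length_strings : Prop := ∀ (arr : List String), Dom_most_frequent_length_strings arr → Pre_most_frequent_length_strings arr → Spec_most_frequent_length_strings arr (most_frequent_length_strings arr)

-- ===== LEMMAS AND PROOFS =====

-- A's counting loop is exactly collections.Counter of the length list
theorem mfls_countA_eq_counter (arr : List String) :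
    arr.foldl (fun d s =>
      let length := PySem.Str.len s
      if d.contains length then d.insert length (d.getD length 0 + 1)
      else d.insert length 1) PySem.Dict.empty
    = PySem.Dict.counter (arr.map PySem.Str.len) := by
  rw [PySem.Dict.counter_eq_foldl, List.foldl_map]
  apply PySem.List.foldl_congr_mem
  intro d s _
  by_cases h : d.contains (PySem.Str.len s)
  · simp only [h, if_true]; rfl
  · simp only [h]
    have h0 : d.getD (PySem.Str.len s) 0 = 0 :=
      PySem.Dict.getD_of_not_contains d 0 (by simpa using h)
    show d.insert _ 1 = d.insert _ (d.getD _ 0 + 1)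
    rw [h0]
    norm_num

-- B's grouping loop: the bucket of length k holds, in order, the strings of length k
theorem mfls_groups_getD (arr : List String) (k : Int) :
    (arr.foldl (fun d s => d.modify (PySem.Str.len s) [] (fun b => b ++ [s]))
      (PySem.Dict.empty : PySem.Dict Int (List String))).getD k []
    = arr.filter (fun s => PySem.Str.len s == k) := by
  have h1 : arr.foldl (fun d s => d.modify (PySem.Str.len s) [] (fun b => b ++ [s]))
      (PySem.Dict.empty : PySem.Dict Int (List String))
      = (arr.map (fun s => (PySem.Str.len s, s))).foldl
          (fun d p => d.modify p.1 [] (fun b => b ++ [p.2])) PySem.Dict.empty := by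
    rw [List.foldl_map]
  rw [h1, PySem.Dict.getD_foldl_modify_append, PySem.Dict.getD_empty, List.nil_append,
    List.filter_map]
  simp [Function.comp_def]

-- the two break-loops pick the same position when sizes agree with counts
theorem mfls_find_corr (S : List Int) (c : Int → Int) (F : Int → List String) (ms : Option Int)
    (hc : ∀ k, ((F k).length : Int) = c k) :
    mfls_find_bucket (S.map F) ms
    = (match mfls_find_length (S.map (fun k => (k, c k))) ms with
       | none => []
       | some k => F k) := by
  induction S with
  | nil => simp [mfls_find_bucket, mfls_find_length]
  | cons k S ih =>
    simp only [List.map_cons, mfls_find_bucket, mfls_find_length, hc k]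
    by_cases h : (some (c k) == ms)
    · simp [h]
    · simp [h, ih]

theorem most_frequent_length_strings_eq (arr : List String) :
    most_frequent_length_strings arr = most_frequent_length_strings_alt arr := by
  unfold most_frequent_length_strings most_frequent_length_strings_alt
  set ls := arr.map PySem.Str.len with hls
  set G := arr.foldl (fun d s => d.modify (PySem.Str.len s) [] (fun b => b ++ [s]))
    (PySem.Dict.empty : PySem.Dict Int (List String)) with hGdef
  set F : Int → List String := fun k => arr.filter (fun s => PySem.Str.len s == k) with hF
  set c : Int → Int := fun k => (ls.count k : Int) with hcdef
  have hcount := mfls_countA_eq_counter arr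
  simp only [hcount]
  -- counts agree with bucket sizes
  have hc : ∀ k, ((F k).length : Int) = c k := by
    intro k
    simp only [hF, hcdef, hls]
    congr 1
    rw [← List.countP_eq_length_filter, List.count_eq_countP, List.countP_map]
    rfl
  -- items of A's counter and of B's groups are parallel over the same key list
  have hSnd : G.keys.Nodup := by
    rw [hGdef]
    exact PySem.Dict.nodup_keys_foldl_modify_key arr PySem.Str.len [] (fun _ s b => b ++ [s])
      PySem.Dict.empty PySem.Dict.nodup_keys_empty
  have hGkeys : G.keys = PySem.Set.ofList ls := by
    rw [hGdef, PySem.Dict.keys_foldl_modify_key, hls]; rfl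
  have hGitems : G.items = (PySem.Set.ofList ls).map (fun k => (k, F k)) := by
    rw [PySem.Dict.items_eq_map_keys G hSnd [], hGkeys]
    apply List.map_congr_left
    intro k _
    exact congrArg (Prod.mk k) (mfls_groups_getD arr k)
  have hAitems : (PySem.Dict.counter ls).items
      = (PySem.Set.ofList ls).map (fun k => (k, c k)) := PySem.Dict.items_counter ls
  -- the two max? arguments are the same list of integers
  have hvalsA : (PySem.Dict.counter ls).values = (PySem.Set.ofList ls).map c := by
    show ((PySem.Dict.counter ls).items.map (·.2)) = _
    rw [hAitems, List.map_map]; rfl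
  have hvalsB : G.values = (PySem.Set.ofList ls).map F := by
    show (G.items.map (·.2)) = _
    rw [hGitems, List.map_map]; rfl
  have hsizes : G.values.map (fun b => (b.length : Int)) = (PySem.Dict.counter ls).values := by
    rw [hvalsB, hvalsA, List.map_map]
    exact List.map_congr_left (fun k _ => hc k)
  rw [hsizes]
  set ms := PySem.List.max? (PySem.Dict.counter ls).values (fun x => x) with hms
  rw [hvalsB, hAitems, mfls_find_corr (PySem.Set.ofList ls) c F ms hc]
  cases hfind : mfls_find_length ((PySem.Set.ofList ls).map (fun k => (k, c k))) ms with
  | none => simp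
  | some k =>
    simp only []
    rw [hF]
    apply List.filter_congr
    intro s _
    show (some k == some (PySem.Str.len s)) = (PySem.Str.len s == k)
    simp [BEq.comm]

-- ===== VERDICT (by name: the statement is the Claim_ definition above) =====
theorem most_frequent_length_strings_spec : Claim_equal_most_frequent_length_strings := by
  intro arr _ _
  unfold Spec_most_frequent_length_strings
  exact most_frequent_length_strings_eq arr
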